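-- pv_equiv track=rewrite | github.com/aman-berhe/Video-Scene-Segmentation | codes/Paper_Results.py | getTruthValue_Man
-- ===== SOURCE A (Python) =====
-- def getTruthValue_Man(shotEnd,shotMakar):
--     truthValueManual=[]
--     truthValueManual_bin=[]
--     truthValueManual_bin_old=[]
--     indx=0
--     sceneTime_man_bin=[]
--     ls=[]
--     ls_bin=[]
--     ls_bin_old=[]
--     for i in range(len(shotEnd)):
--         if shotEnd[i]>=shotMakar[indx]:
--             sceneTime_man_bin.append(shotEnd[i])
--             indx=indx+1
--             truthValueManual_bin.append(0)
--             truthValueManual.append(indx)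
--             truthValueManual_bin_old.append(1)
--             if indx>=len(shotMakar):
--                 ls=[indx]*(len(shotEnd)-len(truthValueManual))
--                 ls_bin=[1]*(len(shotEnd)-len(truthValueManual_bin))
--                 ls_bin_old=[0]*(len(shotEnd)-len(truthValueManual_bin_old))
--                 break
--             else:
--                 continue
--         else:
--             truthValueManual_bin.append(1)
--             truthValueManual_bin_old.append(0)
--             truthValueManual.append(indx)
--     truthValueManual=truthValueManual+ls
--     truthValueManual_bin=truthValueManual_bin+ls_bin
--     truthValueManual_bin_old=truthValueManual_bin_old+ls_bin_old
--
--     return truthValueManual,truthValueManual_bin,truthValueManual_bin_old,sceneTime_man_bin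
-- ===== SOURCE B (Python) =====
-- def getTruthValue_Man(shotEnd, shotMakar):
--     # One classification pass: per-shot match flags + matched shot ends.
--     flags = []
--     sceneTime_man_bin = []
--     indx = 0
--     for e in shotEnd:
--         if indx < len(shotMakar) and e >= shotMakar[indx]:
--             flags.append(1)
--             sceneTime_man_bin.append(e)
--             indx += 1
--         else:
--             flags.append(0)
--     # Derive the three truth lists from the flags.
--     truthValueManual = []
--     s = 0
--     for m in flags:
--         s += m
--         truthValueManual.append(s)
--     truthValueManual_bin = [1 - m for m in flags]
--     truthValueManual_bin_old = list(flags)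
--     return truthValueManual, truthValueManual_bin, truthValueManual_bin_old, sceneTime_man_bin
-- ===== Notes on version B (the rewrite author's own statement) =====
-- stated objective: alternative
-- what changed: B does one classification pass producing per-shot match flags and the matched shot ends, then derives the three truth lists afterwards (running prefix-sum, complement map, copy), replacing A's inline appends plus break-and-fill of the tails.
-- crash fix: On empty shotMakar with nonempty shotEnd A raises IndexError at shotMakar[0]; B returns ([0]*n, [1]*n, [0]*n, []) there. — e.g. on getTruthValue_Man([5, 6], []): A raises IndexError, B returns ([0, 0], [1, 1], [0, 0], [])
import Mathlib
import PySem

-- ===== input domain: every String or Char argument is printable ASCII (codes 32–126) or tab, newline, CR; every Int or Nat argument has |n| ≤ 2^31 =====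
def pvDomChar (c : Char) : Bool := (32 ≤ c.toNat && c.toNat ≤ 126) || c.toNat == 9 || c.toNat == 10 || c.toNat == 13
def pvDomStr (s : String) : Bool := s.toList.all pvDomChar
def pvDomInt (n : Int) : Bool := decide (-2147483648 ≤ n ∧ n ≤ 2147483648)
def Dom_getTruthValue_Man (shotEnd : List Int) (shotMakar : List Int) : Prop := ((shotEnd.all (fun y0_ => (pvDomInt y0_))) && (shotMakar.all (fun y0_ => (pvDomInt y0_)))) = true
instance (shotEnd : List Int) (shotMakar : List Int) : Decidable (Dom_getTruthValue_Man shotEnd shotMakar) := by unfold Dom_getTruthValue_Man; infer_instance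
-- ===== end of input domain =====

-- B replaces A's single append/break-and-fill loop by a classify pass producing match
-- flags, from which the three truth lists are derived afterwards (alternative, same cost).

-- ===== PORT A =====
-- A's for-loop over range(len(shotEnd)) with break; the trailing 'truthValueManual + ls'
-- (etc.) appends are performed at the break / at loop exit (ls = [] when no break).
-- shotMakar[indx] is ported as getD (indx is a nonnegative moving index; it is out of
-- range only when shotMakar = [], which Pre_ excludes as A raises IndexError there).
def getTruthValue_Man.loop (shotEnd shotMakar : List Int) :
    List Int → List Int → List Int → List Int → Nat → List Int →
    List Int × List Int × List Int × List Int
  | [], tVM, tVMb, tVMbo, _, sTmb => (tVM, tVMb, tVMbo, sTmb)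
  | e :: rs, tVM, tVMb, tVMbo, indx, sTmb =>
    if shotMakar.getD indx 0 ≤ e then
      let sTmb' := sTmb ++ [e]
      let indx' := indx + 1
      let tVMb' := tVMb ++ [0]
      let tVM' := tVM ++ [(indx' : Int)]
      let tVMbo' := tVMbo ++ [1]
      if shotMakar.length ≤ indx' then
        (tVM' ++ List.replicate (shotEnd.length - tVM'.length) (indx' : Int),
         tVMb' ++ List.replicate (shotEnd.length - tVMb'.length) 1,
         tVMbo' ++ List.replicate (shotEnd.length - tVMbo'.length) 0,
         sTmb')
      else
        getTruthValue_Man.loop shotEnd shotMakar rs tVM' tVMb' tVMbo' indx' sTmb'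
    else
      getTruthValue_Man.loop shotEnd shotMakar rs (tVM ++ [(indx : Int)]) (tVMb ++ [1]) (tVMbo ++ [0]) indx sTmb

def getTruthValue_Man (shotEnd : List Int) (shotMakar : List Int) : List Int × List Int × List Int × List Int :=
  getTruthValue_Man.loop shotEnd shotMakar shotEnd [] [] [] 0 []

-- ===== PORT B =====
-- classify pass: per-shot match flags and the matched shot-end values
def getTruthValue_Man_alt.classify (shotMakar : List Int) : List Int → Nat → List Int × List Int
  | [], _ => ([], [])
  | e :: rs, indx =>
    if indx < shotMakar.length ∧ shotMakar.getD indx 0 ≤ e then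
      let (f, s) := getTruthValue_Man_alt.classify shotMakar rs (indx + 1)
      (1 :: f, e :: s)
    else
      let (f, s) := getTruthValue_Man_alt.classify shotMakar rs indx
      (0 :: f, s)

-- running prefix-sum of the flags
def getTruthValue_Man_alt.prefixSum : List Int → Int → List Int
  | [], _ => []
  | m :: ms, s => (s + m) :: getTruthValue_Man_alt.prefixSum ms (s + m)

def getTruthValue_Man_alt (shotEnd : List Int) (shotMakar : List Int) : List Int × List Int × List Int × List Int :=
  let (flags, sceneTime) := getTruthValue_Man_alt.classify shotMakar shotEnd 0
  (getTruthValue_Man_alt.prefixSum flags 0, flags.map (fun m => 1 - m), flags, sceneTime)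

-- ===== PRECONDITION & SPEC =====
-- Pre_ excludes only the inputs where A raises IndexError (shotMakar[0] on an empty shotMakar
-- while shotEnd is nonempty); everywhere else A returns normally.
def Pre_getTruthValue_Man (shotEnd : List Int) (shotMakar : List Int) : Prop :=
  shotMakar ≠ [] ∨ shotEnd = []
instance (shotEnd : List Int) (shotMakar : List Int) : Decidable (Pre_getTruthValue_Man shotEnd shotMakar) := by unfold Pre_getTruthValue_Man; infer_instance
def pvWitness_getTruthValue_Man : List Int × List Int := ([1, 3, 4, 7, 9], [2, 8])

-- On empty shotMakar with nonempty shotEnd A raises IndexError; B returns ([0]*n, [1]*n, [0]*n, []).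
def Raises_getTruthValue_Man (shotEnd : List Int) (shotMakar : List Int) : Prop :=
  shotMakar = [] ∧ shotEnd ≠ []
instance (shotEnd : List Int) (shotMakar : List Int) : Decidable (Raises_getTruthValue_Man shotEnd shotMakar) := by unfold Raises_getTruthValue_Man; infer_instance
def pvRaiseWitness_getTruthValue_Man : List Int × List Int := ([5, 6], [])
def pvRaiseWitnessOut_getTruthValue_Man : List Int × List Int × List Int × List Int := ([0, 0], [1, 1], [0, 0], [])

def Spec_getTruthValue_Man (shotEnd : List Int) (shotMakar : List Int) (out : List Int × List Int × List Int × List Int) : Prop := out = getTruthValue_Man_alt shotEnd shotMakar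
instance (shotEnd : List Int) (shotMakar : List Int) (out : List Int × List Int × List Int × List Int) : Decidable (Spec_getTruthValue_Man shotEnd shotMakar out) := by unfold Spec_getTruthValue_Man; infer_instance

-- ===== CLAIM (what is proved, stated in full; the proofs are below) =====
def Claim_equal_getTruthValue_Man : Prop := ∀ (shotEnd : List Int) (shotMakar : List Int), Dom_getTruthValue_Man shotEnd shotMakar → Pre_getTruthValue_Man shotEnd shotMakar → Spec_getTruthValue_Man shotEnd shotMakar (getTruthValue_Man shotEnd shotMakar)
def Claim_raises_getTruthValue_Man : Prop := (∀ (shotEnd : List Int) (shotMakar : List Int), Dom_getTruthValue_Man shotEnd shotMakar → Raises_getTruthValue_Man shotEnd shotMakar → ¬ Pre_getTruthValue_Man shotEnd shotMakar) ∧ (Dom_getTruthValue_Man (pvRaiseWitness_getTruthValue_Man.1) (pvRaiseWitness_getTruthValue_Man.2) ∧ Raises_getTruthValue_Man (pvRaiseWitness_getTruthValue_Man.1) (pvRaiseWitness_getTruthValue_Man.2) ∧ getTruthValue_Man_alt (pvRaiseWitness_getTruthValue_Man.1) (pvRaiseWitness_getTruthValue_Man.2) = pvRaiseWitnessOut_g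etTruthValue_Man)

-- ===== LEMMAS AND PROOFS =====

-- once indx has consumed all of shotMakar, every remaining shot is a non-match
theorem classify_exhausted (shotMakar : List Int) (rest : List Int) (indx : Nat)
    (h : shotMakar.length ≤ indx) :
    getTruthValue_Man_alt.classify shotMakar rest indx = (List.replicate rest.length 0, []) := by
  induction rest with
  | nil => simp [getTruthValue_Man_alt.classify]
  | cons e rs ih =>
    simp only [getTruthValue_Man_alt.classify]
    rw [if_neg (fun hh => absurd hh.1 (by omega))]
    simp [ih, List.replicate_succ]

theorem prefixSum_replicate (n : Nat) (s : Int) :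
    getTruthValue_Man_alt.prefixSum (List.replicate n 0) s = List.replicate n s := by
  induction n generalizing s with
  | zero => simp [getTruthValue_Man_alt.prefixSum]
  | succ k ih => simp [List.replicate_succ, getTruthValue_Man_alt.prefixSum, ih]

-- main invariant: A's loop with accumulators equals the accumulators extended by
-- the lists B derives from the flags of the remaining shots
theorem loop_eq (shotEnd shotMakar : List Int) (rest tVM tVMb tVMbo sTmb : List Int) (indx : Nat)
    (hidx : indx < shotMakar.length)
    (hlen : tVM.length + rest.length = shotEnd.length)
    (hb : tVMb.length = tVM.length) (hbo : tVMbo.length = tVM.length) :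
    getTruthValue_Man.loop shotEnd shotMakar rest tVM tVMb tVMbo indx sTmb =
      ((tVM ++ getTruthValue_Man_alt.prefixSum (getTruthValue_Man_alt.classify shotMakar rest indx).1 (indx : Int),
        tVMb ++ (getTruthValue_Man_alt.classify shotMakar rest indx).1.map (fun m => 1 - m),
        tVMbo ++ (getTruthValue_Man_alt.classify shotMakar rest indx).1,
        sTmb ++ (getTruthValue_Man_alt.classify shotMakar rest indx).2)) := by
  induction rest generalizing tVM tVMb tVMbo sTmb indx with
  | nil => simp [getTruthValue_Man.loop, getTruthValue_Man_alt.classify,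
      getTruthValue_Man_alt.prefixSum]
  | cons e rs ih =>
    by_cases hm : shotMakar.getD indx 0 ≤ e
    · -- match
      have hc : getTruthValue_Man_alt.classify shotMakar (e :: rs) indx =
          (1 :: (getTruthValue_Man_alt.classify shotMakar rs (indx + 1)).1,
           e :: (getTruthValue_Man_alt.classify shotMakar rs (indx + 1)).2) := by
        simp only [getTruthValue_Man_alt.classify]
        rw [if_pos ⟨hidx, hm⟩]
      by_cases hbrk : shotMakar.length ≤ indx + 1
      · -- break-and-fill
        have hex := classify_exhausted shotMakar rs (indx + 1) hbrk
        have hn1 : shotEnd.length - (tVM.length + 1) = rs.length := by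
          simp at hlen; omega
        simp only [getTruthValue_Man.loop, if_pos hm, if_pos hbrk, hc, hex,
          getTruthValue_Man_alt.prefixSum, prefixSum_replicate, List.map_cons,
          List.map_replicate, List.length_append, List.length_cons, List.length_nil,
          List.append_assoc, List.cons_append, List.nil_append]
        simp only [Prod.mk.injEq]
        refine ⟨?_, ?_, ?_, trivial⟩ <;> simp [hb, hbo, hn1]
      · have hbrk' : indx + 1 < shotMakar.length := by omega
        have := ih (tVM ++ [((indx : Int) + 1)]) (tVMb ++ [0]) (tVMbo ++ [1])
          (sTmb ++ [e]) (indx + 1) hbrk' (by simp at hlen ⊢; omega)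
          (by simp [hb]) (by simp [hbo])
        simp only [getTruthValue_Man.loop, if_pos hm, if_neg hbrk, hc]
        push_cast
        rw [this]
        simp [getTruthValue_Man_alt.prefixSum, List.append_assoc]
    · -- non-match
      have hc : getTruthValue_Man_alt.classify shotMakar (e :: rs) indx =
          (0 :: (getTruthValue_Man_alt.classify shotMakar rs indx).1,
           (getTruthValue_Man_alt.classify shotMakar rs indx).2) := by
        simp only [getTruthValue_Man_alt.classify]
        rw [if_neg (fun hh => hm hh.2)]
      have := ih (tVM ++ [(indx : Int)]) (tVMb ++ [1]) (tVMbo ++ [0]) sTmb indx hidx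
        (by simp at hlen ⊢; omega) (by simp [hb]) (by simp [hbo])
      simp only [getTruthValue_Man.loop, if_neg hm, this, hc]
      simp [getTruthValue_Man_alt.prefixSum, List.append_assoc]

-- ===== VERDICT (by name: the statement is the Claim_ definition above) =====
theorem getTruthValue_Man_spec : Claim_equal_getTruthValue_Man := by
  intro shotEnd shotMakar _ hpre
  unfold Spec_getTruthValue_Man
  rcases hpre with hm | he
  · have hidx : 0 < shotMakar.length := List.length_pos_of_ne_nil hm
    unfold getTruthValue_Man getTruthValue_Man_alt
    rw [loop_eq shotEnd shotMakar shotEnd [] [] [] [] 0 hidx (by simp) rfl rfl]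
    simp
  · subst he
    simp [getTruthValue_Man, getTruthValue_Man.loop, getTruthValue_Man_alt,
      getTruthValue_Man_alt.classify, getTruthValue_Man_alt.prefixSum]

theorem getTruthValue_Man_raises : Claim_raises_getTruthValue_Man := by
  unfold Claim_raises_getTruthValue_Man
  exact ⟨by rintro _ _ _ ⟨h1, h2⟩ hpre; rcases hpre with h | h <;> contradiction, by decide⟩

-- witness self-check: B's port really returns the stated literal at pvRaiseWitness_
theorem getTruthValue_Man_raises_witness_ok :
    getTruthValue_Man_alt (pvRaiseWitness_getTruthValue_Man.1) (pvRaiseWitness_getTruthValue_Man.2) = pvRaiseWitnessOut_getTruthValue_Man :=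
  getTruthValue_Man_raises.2.2.2
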